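-- pv_equiv track=rewrite | github.com/Liu-Bot24/relay-hub | relay_openclaw_bridge.py | summarize_error_text
-- ===== SOURCE A (Python) =====
-- def summarize_error_text(text: str) -> str:
--     lines = [line.strip() for line in text.splitlines() if line.strip()]
--     if not lines:
--         return "command failed"
--     last = lines[-1]
--     for prefix in ("FileNotFoundError: ", "ValueError: ", "RuntimeError: "):
--         if last.startswith(prefix):
--             return last.removeprefix(prefix)
--     return last
-- ===== SOURCE B (Python) =====
-- def summarize_error_text(text: str) -> str:
--     # Single character-level scan: maintain the best (last) summarized non-blank
--     # line while the lines are being delimited by hand; no intermediate list of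
--     # lines, and the error prefix is recognized via partition on ": ".
--     best = "command failed"
--     cur = []
--     for ch in text + "\n":
--         if ch == "\n" or ch == "\r":
--             line = "".join(cur).strip()
--             cur = []
--             if line:
--                 head, sep, tail = line.partition(": ")
--                 if sep and head in ("FileNotFoundError", "ValueError", "RuntimeError"):
--                     best = tail
--                 else:
--                     best = line
--         else:
--             cur.append(ch)
--     return best
-- ===== Notes on version B (the rewrite author's own statement) =====
-- stated objective: alternative
-- what changed: Replaces splitlines + build-filtered-list-of-stripped-lines + index last + startswith/removeprefix chain by a single character-level state machine that delimits lines itself while keeping only the latest non-blank summarized line, and recognizes the error prefix via partition on the first colon-space separator instead of three startswith tests.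
import Mathlib
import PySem

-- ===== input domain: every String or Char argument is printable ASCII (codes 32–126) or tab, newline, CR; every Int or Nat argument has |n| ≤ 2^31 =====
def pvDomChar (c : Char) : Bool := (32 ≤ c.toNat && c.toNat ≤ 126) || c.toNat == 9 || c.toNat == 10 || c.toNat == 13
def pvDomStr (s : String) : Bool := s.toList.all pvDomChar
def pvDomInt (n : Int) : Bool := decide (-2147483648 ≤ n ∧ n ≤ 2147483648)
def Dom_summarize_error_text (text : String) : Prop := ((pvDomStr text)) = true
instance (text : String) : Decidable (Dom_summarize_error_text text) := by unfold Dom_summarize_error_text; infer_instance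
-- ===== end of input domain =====

-- B replaces A's build-list-of-stripped-lines-then-index-last pass (plus a startswith chain)
-- by a single character-level state machine that delimits lines itself and recognizes the
-- error prefix via partition on ": " (alternative decomposition, same cost).


-- ===== PORT A =====
-- the 'for prefix in (...)' loop; last.removeprefix(prefix) under startswith is exactly
-- dropping len(prefix) characters (exact here since the prefix is known to be present)
def pvStripPrefA : List (List Char) → List Char → List Char
  | [], last => last
  | p :: ps, last =>
    if PySem.Chars.startswith last p then last.drop p.length
    else pvStripPrefA ps last

def summarize_error_text (text : String) : String :=
  let lines := ((PySem.Chars.splitlines text.toList).filter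
      (fun line => !(PySem.Chars.strip line == []))).map PySem.Chars.strip
  if lines = [] then "command failed"
  else String.ofList (pvStripPrefA
    ["FileNotFoundError: ".toList, "ValueError: ".toList, "RuntimeError: ".toList]
    lines.getLast!)

-- ===== PORT B =====
-- line.partition(": "): first occurrence of ": " (PySem.Chars.find); the nonnegative
-- take/drop slices are exact for Python's s[:i] and s[i+2:]
def pvPartition (s : List Char) : List Char × List Char × List Char :=
  let i := PySem.Chars.find s [':', ' ']
  if i = -1 then (s, [], [])
  else (s.take i.toNat, [':', ' '], s.drop (i.toNat + 2))

-- the body of B's 'if line:' block: choose tail or the line itself as the new best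
def pvProcessLine (s : List Char) : List Char :=
  let (head, sep, tail) := pvPartition s
  if sep ≠ [] ∧ (head = "FileNotFoundError".toList ∨ head = "ValueError".toList ∨
      head = "RuntimeError".toList) then tail else s

def pvFlush (best cur : List Char) : List Char :=
  let line := PySem.Chars.strip cur
  if line = [] then best else pvProcessLine line

-- one step of B's for-loop over the characters of text + "\n"; state = (best, cur)
def pvStep (st : List Char × List Char) (c : Char) : List Char × List Char :=
  if c = '\n' ∨ c = '\r' then (pvFlush st.1 st.2, []) else (st.1, st.2 ++ [c])

def summarize_error_text_alt (text : String) : String :=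
  String.ofList
    (List.foldl pvStep ("command failed".toList, ([] : List Char)) (text.toList ++ ['\n'])).1

-- ===== PRECONDITION & SPEC =====
def Spec_summarize_error_text (text : String) (out : String) : Prop := out = summarize_error_text_alt text
instance (text : String) (out : String) : Decidable (Spec_summarize_error_text text out) := by unfold Spec_summarize_error_text; infer_instance

-- ===== CLAIM (what is proved, stated in full; the proofs are below) =====
def Claim_equal_summarize_error_text : Prop := ∀ (text : String), Dom_summarize_error_text text → Spec_summarize_error_text text (summarize_error_text text)

-- ===== LEMMAS AND PROOFS =====

-- the line-break test splitlines uses (the 'have isB := …' inside PySem.Chars.splitlines)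
def pvIsB (c : Char) : Bool :=
  let n := c.toNat
  decide (n = 10) || decide (n = 13) || decide (n = 11) || decide (n = 12) || decide (n = 28) ||
    decide (n = 29) || decide (n = 30) || decide (n = 133) || decide (n = 8232) || decide (n = 8233)

theorem pv_splitlines_eq_go (cs : List Char) :
    PySem.Chars.splitlines cs = PySem.Chars.splitlines.go pvIsB cs [] [] := rfl

-- folding B's per-line update over a list of lines
def pvG (best : List Char) (L : List (List Char)) : List Char := L.foldl pvFlush best

theorem pv_isB_dom {c : Char} (h : pvDomChar c = true) :
    pvIsB c = true ↔ (c = '\n' ∨ c = '\r') := by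
  have h10 : c = '\n' ↔ c.toNat = 10 :=
    ⟨fun e => e ▸ rfl, fun e => Char.ext (UInt32.toNat_inj.mp e)⟩
  have h13 : c = '\r' ↔ c.toNat = 13 :=
    ⟨fun e => e ▸ rfl, fun e => Char.ext (UInt32.toNat_inj.mp e)⟩
  simp [pvIsB, pvDomChar, h10, h13] at *
  omega

theorem pv_go_acc (isB : Char → Bool) (cs cur : List Char) (a : List (List Char)) :
    ∀ acc, PySem.Chars.splitlines.go isB cs cur acc
      = acc.reverse ++ PySem.Chars.splitlines.go isB cs cur [] := by
  induction cs, cur, a using PySem.Chars.splitlines.go.induct (isB := isB) with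
  | case1 cur a hemp =>
    intro acc
    rw [PySem.Chars.splitlines.go, PySem.Chars.splitlines.go]
    simp [hemp]
  | case2 cur a hemp =>
    intro acc
    rw [PySem.Chars.splitlines.go, PySem.Chars.splitlines.go]
    simp [hemp]
  | case3 rest cur a ih =>
    intro acc
    rw [PySem.Chars.splitlines.go, PySem.Chars.splitlines.go]
    rw [ih (cur.reverse :: acc), ih [cur.reverse]]
    simp
  | case4 c rest cur a hpair hB ih =>
    intro acc
    rw [PySem.Chars.splitlines.go, PySem.Chars.splitlines.go]
    · simp only [hB, if_true]
      rw [ih (cur.reverse :: acc), ih [cur.reverse]]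
      simp
    all_goals exact hpair
  | case5 c rest cur a hpair hnB ih =>
    intro acc
    rw [PySem.Chars.splitlines.go, PySem.Chars.splitlines.go]
    · simp only [hnB, if_false, Bool.false_eq_true]
      rw [ih acc]
    all_goals exact hpair

theorem pv_machine_eq_go (cs cur : List Char) (a : List (List Char)) :
    cs.all pvDomChar = true → ∀ best,
      (List.foldl pvStep (best, cur.reverse) (cs ++ ['\n'])).1
        = pvG best (PySem.Chars.splitlines.go pvIsB cs cur []) := by
  induction cs, cur, a using PySem.Chars.splitlines.go.induct (isB := pvIsB) with
  | case1 cur a hemp =>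
    intro _ best
    rw [PySem.Chars.splitlines.go]
    have hc : cur = [] := List.isEmpty_iff.mp hemp
    subst hc
    simp [pvStep, pvFlush, pvG, PySem.Chars.strip, PySem.Chars.lstrip, PySem.Chars.rstrip]
  | case2 cur a hemp =>
    intro _ best
    rw [PySem.Chars.splitlines.go]
    simp [hemp, pvStep, pvG]
  | case3 rest cur a ih =>
    intro h best
    rw [PySem.Chars.splitlines.go]
    rw [pv_go_acc pvIsB rest [] [] [cur.reverse]]
    have hrest : rest.all pvDomChar = true := by
      simp only [List.all_eq_true] at h ⊢
      exact fun x hx => h x (List.mem_cons_of_mem _ (List.mem_cons_of_mem _ hx))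
    have := ih hrest (pvFlush best cur.reverse)
    simp only [List.reverse_nil] at this
    simp only [List.cons_append, List.foldl_cons]
    rw [show pvStep (best, cur.reverse) '\r' = (pvFlush best cur.reverse, []) from by
      simp [pvStep]]
    rw [show pvStep (pvFlush best cur.reverse, []) '\n' = (pvFlush best cur.reverse, []) from by
      simp [pvStep, pvFlush, PySem.Chars.strip, PySem.Chars.lstrip, PySem.Chars.rstrip]]
    rw [this]
    simp [pvG]
  | case4 c rest cur a hpair hB ih =>
    intro h best
    have hdc : pvDomChar c = true := by
      simp only [List.all_eq_true] at h; exact h c List.mem_cons_self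
    have hrest : rest.all pvDomChar = true := by
      simp only [List.all_eq_true] at h ⊢
      exact fun x hx => h x (List.mem_cons_of_mem _ hx)
    have hc : c = '\n' ∨ c = '\r' := (pv_isB_dom hdc).mp hB
    rw [PySem.Chars.splitlines.go]
    · simp only [hB, if_true]
      rw [pv_go_acc pvIsB rest [] [] [cur.reverse]]
      have := ih hrest (pvFlush best cur.reverse)
      simp only [List.reverse_nil] at this
      simp only [List.cons_append, List.foldl_cons]
      rw [show pvStep (best, cur.reverse) c = (pvFlush best cur.reverse, []) from by
        simp [pvStep, hc]]
      rw [this]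
      simp [pvG]
    all_goals exact hpair
  | case5 c rest cur a hpair hnB ih =>
    intro h best
    have hdc : pvDomChar c = true := by
      simp only [List.all_eq_true] at h; exact h c List.mem_cons_self
    have hrest : rest.all pvDomChar = true := by
      simp only [List.all_eq_true] at h ⊢
      exact fun x hx => h x (List.mem_cons_of_mem _ hx)
    have hc : ¬(c = '\n' ∨ c = '\r') := fun hor => hnB ((pv_isB_dom hdc).mpr hor)
    rw [PySem.Chars.splitlines.go]
    · simp only [hnB, if_false, Bool.false_eq_true]
      have := ih hrest best
      simp only [List.cons_append, List.foldl_cons]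
      rw [show pvStep (best, cur.reverse) c = (best, (c :: cur).reverse) from by
        simp [pvStep, hc]]
      exact this
    all_goals exact hpair

theorem pv_getLast!_cons {α : Type} [Inhabited α] (a : α) (l : List α) (h : l ≠ []) :
    (a :: l).getLast! = l.getLast! := by
  rcases l with _ | ⟨b, m⟩
  · exact absurd rfl h
  · rfl

theorem pv_G_eq (L : List (List Char)) : ∀ best, pvG best L
      = (let S := (L.filter (fun l => !(PySem.Chars.strip l == []))).map PySem.Chars.strip
         if S = [] then best else pvProcessLine S.getLast!) := by
  induction L with
  | nil => intro best; simp [pvG]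
  | cons l L ih =>
    intro best
    simp only [pvG, List.foldl_cons]
    have hstep : L.foldl pvFlush (pvFlush best l) = pvG (pvFlush best l) L := rfl
    rw [hstep, ih (pvFlush best l)]
    simp only [List.filter_cons]
    by_cases hl : PySem.Chars.strip l = []
    · have hPl : (!(PySem.Chars.strip l == [])) = false := by simp [hl]
      have hfl : pvFlush best l = best := by simp [pvFlush, hl]
      simp only [hPl, Bool.false_eq_true, if_false, hfl]
    · have hPl : (!(PySem.Chars.strip l == [])) = true := by simp [hl]
      have hfl : pvFlush best l = pvProcessLine (PySem.Chars.strip l) := by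
        simp [pvFlush, hl]
      simp only [hPl, if_true, List.map_cons, hfl]
      by_cases hS : (L.filter (fun l => !(PySem.Chars.strip l == []))).map PySem.Chars.strip = []
      · rw [if_pos hS, hS, if_neg (by simp : ¬(PySem.Chars.strip l :: ([] : List (List Char)) = []))]
        rfl
      · rw [if_neg hS, if_neg (by simp : ¬(PySem.Chars.strip l ::
            (L.filter (fun l => !(PySem.Chars.strip l == []))).map PySem.Chars.strip = [])),
          pv_getLast!_cons _ _ hS]

-- an occurrence of ": " at position j means s[j]? is ':'

theorem pv_occ_colon {s : List Char} {j : ℕ} (h : [':', ' '] <+: s.drop j) :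
    s[j]? = some ':' := by
  obtain ⟨t, ht⟩ := h
  have : (s.drop j)[0]? = some ':' := by rw [← ht]; rfl
  simpa [List.getElem?_drop] using this

theorem pv_sw_iff (name : List Char) (s : List Char) (hcol : ':' ∉ name) :
    PySem.Chars.startswith s (name ++ [':', ' ']) = true ↔
      (PySem.Chars.find s [':', ' '] = (name.length : Int) ∧ s.take name.length = name) := by
  rw [PySem.Chars.startswith_iff]
  constructor
  · intro h
    obtain ⟨t, ht⟩ := h
    rw [List.append_assoc] at ht
    have htake : s.take name.length = name := by
      rw [← ht]; exact List.take_left ..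
    have hdrop : s.drop name.length = [':', ' '] ++ t := by
      rw [← ht]; exact List.drop_left ..
    have hocc : [':', ' '] <+: s.drop name.length := ⟨t, hdrop.symm⟩
    have hin : PySem.Chars.isIn [':', ' '] s = true :=
      (PySem.Chars.exists_prefix_drop_iff_isIn [':', ' '] s).mp ⟨name.length, hocc⟩
    have h0 : 0 ≤ PySem.Chars.find s [':', ' '] :=
      (PySem.Chars.find_nonneg_iff s [':', ' ']).mpr ((PySem.Chars.isIn_iff_infix [':', ' '] s).mp hin)
    obtain ⟨hpref, hmin⟩ := PySem.Chars.find_spec h0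
    have hle : (PySem.Chars.find s [':', ' ']).toNat ≤ name.length := by
      by_contra hgt
      exact hmin name.length (by omega) hocc
    have hge : ¬ (PySem.Chars.find s [':', ' ']).toNat < name.length := by
      intro hlt
      have hc := pv_occ_colon hpref
      have hp : name <+: s := ⟨[':', ' '] ++ t, ht⟩
      have hlen : name.length ≤ s.length := hp.length_le
      have : name[(PySem.Chars.find s [':', ' ']).toNat] = s[(PySem.Chars.find s [':', ' ']).toNat]'(by omega) := hp.getElem hlt
      have hmem : ':' ∈ name := by
        have : s[(PySem.Chars.find s [':', ' ']).toNat]? = some name[(PySem.Chars.find s [':', ' ']).toNat] := by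
          rw [List.getElem?_eq_getElem (by omega)]
          exact congrArg some this.symm
        rw [hc] at this
        have := (Option.some.injEq _ _).mp this
        exact this ▸ List.getElem_mem _
      exact hcol hmem
    constructor
    · omega
    · exact htake
  · rintro ⟨hf, htake⟩
    have h0 : 0 ≤ PySem.Chars.find s [':', ' '] := by rw [hf]; positivity
    obtain ⟨hpref, -⟩ := PySem.Chars.find_spec h0
    rw [hf] at hpref
    simp only [Int.toNat_natCast] at hpref
    obtain ⟨t, ht⟩ := hpref
    refine ⟨t, ?_⟩
    rw [List.append_assoc, ht]
    calc name ++ List.drop name.length s = List.take name.length s ++ List.drop name.length s := by rw [htake]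
      _ = s := List.take_append_drop ..

theorem pv_prefix_eq (s : List Char) :
    pvProcessLine s = pvStripPrefA
      ["FileNotFoundError: ".toList, "ValueError: ".toList, "RuntimeError: ".toList] s := by
  have L1 : ("FileNotFoundError".toList).length = 17 := by decide
  have L2 : ("ValueError".toList).length = 10 := by decide
  have L3 : ("RuntimeError".toList).length = 12 := by decide
  have e1 := pv_sw_iff "FileNotFoundError".toList s (by decide)
  have e2 := pv_sw_iff "ValueError".toList s (by decide)
  have e3 := pv_sw_iff "RuntimeError".toList s (by decide)
  rw [L1] at e1
  rw [L2] at e2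
  rw [L3] at e3
  by_cases h0 : PySem.Chars.find s [':', ' '] = -1
  · have s1 : PySem.Chars.startswith s ("FileNotFoundError".toList ++ [':', ' ']) = false := by
      cases hb : PySem.Chars.startswith s ("FileNotFoundError".toList ++ [':', ' ']) with
      | false => rfl
      | true => have := (e1.mp hb).1; rw [h0] at this; exact absurd this (by decide)
    have s2 : PySem.Chars.startswith s ("ValueError".toList ++ [':', ' ']) = false := by
      cases hb : PySem.Chars.startswith s ("ValueError".toList ++ [':', ' ']) with
      | false => rfl
      | true => have := (e2.mp hb).1; rw [h0] at this; exact absurd this (by decide)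
    have s3 : PySem.Chars.startswith s ("RuntimeError".toList ++ [':', ' ']) = false := by
      cases hb : PySem.Chars.startswith s ("RuntimeError".toList ++ [':', ' ']) with
      | false => rfl
      | true => have := (e3.mp hb).1; rw [h0] at this; exact absurd this (by decide)
    simp at s1 s2 s3
    simp [pvProcessLine, pvPartition, pvStripPrefA, s1, s2, s3, h0]
  · have hge : 0 ≤ PySem.Chars.find s [':', ' '] := by
      have := PySem.Chars.neg_one_le_find s [':', ' ']; omega
    have hlen := PySem.Chars.find_le_length s [':', ' ']
    set i := (PySem.Chars.find s [':', ' ']).toNat with hi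
    have hieq : PySem.Chars.find s [':', ' '] = (i : Int) := (Int.toNat_of_nonneg hge).symm
    have hile : i ≤ s.length := by omega
    by_cases hd1 : s.take i = "FileNotFoundError".toList
    · have hi17 : i = 17 := by
        have := congrArg List.length hd1
        rw [List.length_take, L1] at this
        omega
      have hsw1 : PySem.Chars.startswith s ("FileNotFoundError".toList ++ [':', ' ']) = true :=
        e1.mpr ⟨by rw [hieq, hi17], hi17 ▸ hd1⟩
      rw [hi17] at hd1
      simp at hsw1 hd1
      simp [pvProcessLine, pvPartition, pvStripPrefA, hsw1, hd1, hieq, hi17]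
    · have s1 : PySem.Chars.startswith s ("FileNotFoundError".toList ++ [':', ' ']) = false := by
        cases hb : PySem.Chars.startswith s ("FileNotFoundError".toList ++ [':', ' ']) with
        | false => rfl
        | true =>
          obtain ⟨hf, ht⟩ := e1.mp hb
          rw [hieq] at hf
          have : i = 17 := by exact_mod_cast hf
          exact absurd (this ▸ ht) hd1
      by_cases hd2 : s.take i = "ValueError".toList
      · have hi10 : i = 10 := by
          have := congrArg List.length hd2
          rw [List.length_take, L2] at this
          omega
        have hsw2 : PySem.Chars.startswith s ("ValueError".toList ++ [':', ' ']) = true :=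
          e2.mpr ⟨by rw [hieq, hi10], hi10 ▸ hd2⟩
        rw [hi10] at hd1 hd2
        simp at s1 hsw2 hd1 hd2
        simp [pvProcessLine, pvPartition, pvStripPrefA, s1, hsw2, hd2, hieq, hi10]
      · have s2 : PySem.Chars.startswith s ("ValueError".toList ++ [':', ' ']) = false := by
          cases hb : PySem.Chars.startswith s ("ValueError".toList ++ [':', ' ']) with
          | false => rfl
          | true =>
            obtain ⟨hf, ht⟩ := e2.mp hb
            rw [hieq] at hf
            have : i = 10 := by exact_mod_cast hf
            exact absurd (this ▸ ht) hd2
        by_cases hd3 : s.take i = "RuntimeError".toList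
        · have hi12 : i = 12 := by
            have := congrArg List.length hd3
            rw [List.length_take, L3] at this
            omega
          have hsw3 : PySem.Chars.startswith s ("RuntimeError".toList ++ [':', ' ']) = true :=
            e3.mpr ⟨by rw [hieq, hi12], hi12 ▸ hd3⟩
          rw [hi12] at hd1 hd2 hd3
          simp at s1 s2 hsw3 hd1 hd2 hd3
          simp [pvProcessLine, pvPartition, pvStripPrefA, s1, s2, hsw3, hd3, hieq, hi12]
        · have s3 : PySem.Chars.startswith s ("RuntimeError".toList ++ [':', ' ']) = false := by
            cases hb : PySem.Chars.startswith s ("RuntimeError".toList ++ [':', ' ']) with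
            | false => rfl
            | true =>
              obtain ⟨hf, ht⟩ := e3.mp hb
              rw [hieq] at hf
              have : i = 12 := by exact_mod_cast hf
              exact absurd (this ▸ ht) hd3
          simp at s1 s2 s3 hd1 hd2 hd3
          simp [pvProcessLine, pvPartition, pvStripPrefA, s1, s2, s3, hd1, hd2, hd3, hieq]

-- ===== VERDICT (by name: the statement is the Claim_ definition above) =====
theorem summarize_error_text_spec : Claim_equal_summarize_error_text := by
  intro text hdom
  unfold Spec_summarize_error_text summarize_error_text summarize_error_text_alt
  have h : text.toList.all pvDomChar = true := hdom
  have hmach := pv_machine_eq_go text.toList [] [] h "command failed".toList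
  simp only [List.reverse_nil] at hmach
  rw [hmach, ← pv_splitlines_eq_go, pv_G_eq]
  show (if _ = ([] : List (List Char)) then _ else _) = String.ofList (if _ = ([] : List (List Char)) then _ else _)
  split_ifs with hS
  · rfl
  · rw [pv_prefix_eq]
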